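-- pv_equiv track=rewrite | github.com/malikinss/PyGen | PyGen for Advanced/11_dictionaries_final_test/11_2_final_test_part_2/11_2_3_calculate_scrabble_score/11_2_3_calculate_scrabble_score.py | calculate_scrabble_score
-- ===== SOURCE A (Python) =====
-- def calculate_scrabble_score(word: str) -> int:
--     """
--     Calculates the total Scrabble score for the given word.
--
--     Args:
--         word (str): The word for which to calculate the score.
--
--     Returns:
--         int: The total Scrabble score.
--     """
--     letter_price = {
--         1: "AEILNORSTU",
--         2: "DG",
--         3: "BCMP",
--         4: "FHVWY",
--         5: "K",
--         8: "JX",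
--         10: "QZ"
--     }
--
--     # Create a dictionary mapping each letter to its score
--     price_mapping = {
--         letter: score
--         for score, letters in letter_price.items()
--         for letter in letters
--     }
--
--     # Calculate total price by summing the score of each letter in the word
--     total_price = sum(price_mapping.get(letter.upper(), 0) for letter in word)
--     return total_price
-- ===== SOURCE B (Python) =====
-- def calculate_scrabble_score(word: str) -> int:
--     """
--     Calculates the total Scrabble score for the given word.
--
--     Args:
--         word (str): The word for which to calculate the score.
--
--     Returns:
--         int: The total Scrabble score.
--     """
--     letter_price = {
--         1: "AEILNORSTU",
--         2: "DG",
--         3: "BCMP",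
--         4: "FHVWY",
--         5: "K",
--         8: "JX",
--         10: "QZ"
--     }
--     total = 0
--     for score, letters in letter_price.items():
--         group = set(letters)
--         total += score * sum(1 for c in word if c.upper() in group)
--     return total
-- ===== Notes on version B (the rewrite author's own statement) =====
-- stated objective: alternative
-- what changed: B never inverts the score->letters table into a per-letter dict; it loops over the seven score groups and adds score * (count of word characters whose uppercase is in that group's letter set), scanning the word once per group.
import Mathlib
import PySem

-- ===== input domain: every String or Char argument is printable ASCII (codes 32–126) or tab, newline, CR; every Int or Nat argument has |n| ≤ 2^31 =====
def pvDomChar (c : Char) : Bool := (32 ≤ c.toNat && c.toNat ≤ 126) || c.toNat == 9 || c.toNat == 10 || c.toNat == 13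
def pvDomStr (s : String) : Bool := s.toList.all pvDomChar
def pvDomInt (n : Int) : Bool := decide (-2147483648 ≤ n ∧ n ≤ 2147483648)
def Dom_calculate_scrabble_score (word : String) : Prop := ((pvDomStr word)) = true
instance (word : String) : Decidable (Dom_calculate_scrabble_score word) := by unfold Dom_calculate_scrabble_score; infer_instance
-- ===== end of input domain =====

-- B keeps the score->letters table uninverted and sums score * (count of word letters in each group); same O(n) cost, different decomposition.

-- ===== PORT A =====
-- letter_price, in dict insertion order (keys are 1-char strings, ported as Char)
def pvLetterPrice : List (Int × List Char) :=
  [(1, "AEILNORSTU".toList), (2, "DG".toList), (3, "BCMP".toList), (4, "FHVWY".toList),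
   (5, "K".toList), (8, "JX".toList), (10, "QZ".toList)]

-- price_mapping = {letter: score for score, letters in letter_price.items() for letter in letters}
def pvPriceMapping : PySem.Dict Char Int :=
  pvLetterPrice.foldl
    (fun d p => p.2.foldl (fun d letter => d.insert letter p.1) d)
    PySem.Dict.empty

def calculate_scrabble_score (word : String) : Int :=
  word.toList.foldl (fun acc letter => acc + pvPriceMapping.getD (PySem.Chars.upperChar letter) 0) 0

-- ===== PORT B =====
def calculate_scrabble_score_alt (word : String) : Int :=
  pvLetterPrice.foldl
    (fun total p =>
      let group : PySem.Set Char := PySem.Set.ofList p.2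
      total + p.1 * word.toList.foldl (fun n c => if PySem.Chars.upperChar c ∈ group then n + 1 else n) 0)
    0

-- ===== PRECONDITION & SPEC =====
def Spec_calculate_scrabble_score (word : String) (out : Int) : Prop := out = calculate_scrabble_score_alt word
instance (word : String) (out : Int) : Decidable (Spec_calculate_scrabble_score word out) := by unfold Spec_calculate_scrabble_score; infer_instance

-- ===== CLAIM (what is proved, stated in full; the proofs are below) =====
def Claim_equal_calculate_scrabble_score : Prop := ∀ (word : String), Dom_calculate_scrabble_score word → Spec_calculate_scrabble_score word (calculate_scrabble_score word)

-- ===== LEMMAS AND PROOFS =====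

-- A's per-character score
def pvScoreA (c : Char) : Int := pvPriceMapping.getD (PySem.Chars.upperChar c) 0

-- B's per-character contribution: the sum over groups of score * (1 if the letter is in the group)
def pvScoreB (c : Char) : Int :=
  pvLetterPrice.foldl
    (fun t p => t + p.1 * (if PySem.Chars.upperChar c ∈ PySem.Set.ofList p.2 then 1 else 0)) 0

set_option maxRecDepth 8192 in
lemma pvScore_eq_of_dom (c : Char) (h : pvDomChar c = true) : pvScoreA c = pvScoreB c := by
  have hlt : c.toNat < 128 := by
    simp only [pvDomChar, Bool.or_eq_true, Bool.and_eq_true, decide_eq_true_eq, beq_iff_eq] at h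
    omega
  have key : ∀ n : Nat, n < 128 → pvScoreA (Char.ofNat n) = pvScoreB (Char.ofNat n) := by decide
  have := key c.toNat hlt
  rwa [Char.ofNat_toNat] at this

-- B over a cons: each of the seven group counts steps by its indicator
lemma pvAltCore_cons (c : Char) (cs : List Char) :
    pvLetterPrice.foldl
        (fun total p =>
          let group : PySem.Set Char := PySem.Set.ofList p.2
          total + p.1 * (c :: cs).foldl (fun n x => if PySem.Chars.upperChar x ∈ group then n + 1 else n) 0)
        0
      = pvScoreB c +
        pvLetterPrice.foldl
          (fun total p =>
            let group : PySem.Set Char := PySem.Set.ofList p.2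
            total + p.1 * cs.foldl (fun n x => if PySem.Chars.upperChar x ∈ group then n + 1 else n) 0)
          0 := by
  simp only [pvScoreB, pvLetterPrice, List.foldl, List.foldl_cons,
    PySem.List.foldl_ite_add_one]
  split_ifs <;> ring

lemma pvCore_eq (cs : List Char) (h : ∀ c ∈ cs, pvDomChar c = true) :
    cs.foldl (fun acc letter => acc + pvScoreA letter) 0
      = pvLetterPrice.foldl
          (fun total p =>
            let group : PySem.Set Char := PySem.Set.ofList p.2
            total + p.1 * cs.foldl (fun n x => if PySem.Chars.upperChar x ∈ group then n + 1 else n) 0)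
          0 := by
  induction cs with
  | nil => decide
  | cons c cs ih =>
      rw [pvAltCore_cons, List.foldl_cons, zero_add, PySem.List.foldl_add,
        ← ih (fun x hx => h x (List.mem_cons_of_mem _ hx)),
        PySem.List.foldl_add, pvScore_eq_of_dom c (h c (List.mem_cons_self ..))]
      ring

-- ===== VERDICT (by name: the statement is the Claim_ definition above) =====
theorem calculate_scrabble_score_spec : Claim_equal_calculate_scrabble_score := by
  intro word hdom
  unfold Spec_calculate_scrabble_score calculate_scrabble_score calculate_scrabble_score_alt
  have h : ∀ c ∈ word.toList, pvDomChar c = true := by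
    simpa [Dom_calculate_scrabble_score, pvDomStr, List.all_eq_true] using hdom
  exact pvCore_eq word.toList h
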